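-- pv_equiv track=rewrite | github.com/GiacomoRinaldi/STM32_Logic_Analyzer | python_scripts/hex_output.py | get_line_level_at
-- ===== SOURCE A (Python) =====
-- def get_line_level_at(transitions, sample_time):
--     level = 1  # UART idle line is high
--     for edge, t in transitions:
--         if t > sample_time:
--             break
--         if edge == 'falling':
--             level = 0
--         elif edge == 'rising':
--             level = 1
--     return level
-- ===== SOURCE B (Python) =====
-- from itertools import takewhile
--
-- def get_line_level_at(transitions, sample_time):
--     # prefix up to the first transition after sample_time (mirrors the break)
--     prefix = list(takewhile(lambda et: et[1] <= sample_time, transitions))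
--     # scan backwards for the last recognised edge
--     for edge, _t in reversed(prefix):
--         if edge == 'rising':
--             return 1
--         if edge == 'falling':
--             return 0
--     return 1  # UART idle line is high
-- ===== Notes on version B (the rewrite author's own statement) =====
-- stated objective: alternative
-- what changed: Replaces the forward accumulator loop by a takewhile prefix followed by a reverse scan that returns on the last recognised edge before sample_time.
import Mathlib
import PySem

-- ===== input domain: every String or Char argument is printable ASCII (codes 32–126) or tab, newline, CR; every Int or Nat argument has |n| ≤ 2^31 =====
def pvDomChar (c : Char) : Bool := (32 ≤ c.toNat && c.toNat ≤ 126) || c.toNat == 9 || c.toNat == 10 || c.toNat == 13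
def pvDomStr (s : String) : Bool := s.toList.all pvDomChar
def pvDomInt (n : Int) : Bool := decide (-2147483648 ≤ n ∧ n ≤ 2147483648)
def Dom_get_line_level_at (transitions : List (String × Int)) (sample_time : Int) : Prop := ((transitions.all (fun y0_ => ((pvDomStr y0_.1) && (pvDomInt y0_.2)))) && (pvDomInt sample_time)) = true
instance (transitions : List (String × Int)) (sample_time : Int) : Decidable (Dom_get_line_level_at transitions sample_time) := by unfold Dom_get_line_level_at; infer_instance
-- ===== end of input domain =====

-- B replaces A's forward accumulator loop by a takewhile prefix plus a reverse scan (alternative decomposition, same cost).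

-- ===== PORT A =====
-- the for-loop with its break and the running `level` accumulator
def pvALoop (sample_time : Int) : List (String × Int) → Int → Int
  | [], level => level
  | (edge, t) :: rest, level =>
    if t > sample_time then level
    else pvALoop sample_time rest
      (if edge = "falling" then 0 else if edge = "rising" then 1 else level)

def get_line_level_at (transitions : List (String × Int)) (sample_time : Int) : Int :=
  pvALoop sample_time transitions 1

-- ===== PORT B =====
-- reverse scan: return on the first recognised edge, default 1 (idle high)
def pvBScan : List (String × Int) → Int
  | [] => 1
  | (edge, _) :: rest =>
    if edge = "rising" then 1 else if edge = "falling" then 0 else pvBScan rest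

def get_line_level_at_alt (transitions : List (String × Int)) (sample_time : Int) : Int :=
  pvBScan ((transitions.takeWhile (fun et => decide (et.2 ≤ sample_time))).reverse)

-- ===== PRECONDITION & SPEC =====
def Spec_get_line_level_at (transitions : List (String × Int)) (sample_time : Int) (out : Int) : Prop := out = get_line_level_at_alt transitions sample_time
instance (transitions : List (String × Int)) (sample_time : Int) (out : Int) : Decidable (Spec_get_line_level_at transitions sample_time out) := by unfold Spec_get_line_level_at; infer_instance

-- ===== CLAIM (what is proved, stated in full; the proofs are below) =====
def Claim_equal_get_line_level_at : Prop := ∀ (transitions : List (String × Int)) (sample_time : Int), Dom_get_line_level_at transitions sample_time → Spec_get_line_level_at transitions sample_time (get_line_level_at transitions sample_time)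

-- ===== LEMMAS AND PROOFS =====

-- B's reverse scan with a generalised default value (proof-only helper)
def pvGScan (d : Int) : List (String × Int) → Int
  | [] => d
  | (edge, _) :: rest =>
    if edge = "rising" then 1 else if edge = "falling" then 0 else pvGScan d rest

theorem pvGScan_one (l : List (String × Int)) : pvGScan 1 l = pvBScan l := by
  induction l with
  | nil => rfl
  | cons p rest ih => cases p; simp [pvGScan, pvBScan, ih]

theorem pvGScan_append_singleton (l : List (String × Int)) (edge : String) (t d : Int) :
    pvGScan d (l ++ [(edge, t)]) =
      pvGScan (if edge = "falling" then 0 else if edge = "rising" then 1 else d) l := by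
  induction l with
  | nil =>
    by_cases hf : edge = "falling"
    · subst hf; simp [pvGScan]
    · by_cases hr : edge = "rising" <;> simp [pvGScan, hf, hr]
  | cons p rest ih => cases p; simp [pvGScan, ih]

theorem pvALoop_eq_gscan (sample_time : Int) (l : List (String × Int)) (d : Int) :
    pvALoop sample_time l d =
      pvGScan d ((l.takeWhile (fun et => decide (et.2 ≤ sample_time))).reverse) := by
  induction l generalizing d with
  | nil => rfl
  | cons p rest ih =>
    obtain ⟨edge, t⟩ := p
    by_cases h : t > sample_time
    · have : ¬ (t ≤ sample_time) := by omega
      simp [pvALoop, h, List.takeWhile, this, pvGScan]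
    · have hle : t ≤ sample_time := by omega
      simp only [pvALoop, if_neg h, ih, List.takeWhile, decide_eq_true hle]
      simp [List.reverse_cons, pvGScan_append_singleton]

-- ===== VERDICT (by name: the statement is the Claim_ definition above) =====
theorem get_line_level_at_spec : Claim_equal_get_line_level_at := by
  intro transitions sample_time _
  unfold Spec_get_line_level_at get_line_level_at get_line_level_at_alt
  rw [pvALoop_eq_gscan, pvGScan_one]
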